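-- pv_equiv track=rewrite | github.com/KendraGivens/robust-body-exposure | code/cma_gnn_util.py | get_body_point_colors_uncovering
-- ===== SOURCE A (Python) =====
-- def get_body_point_colors_uncovering(initial_covered_status, covered_status):
--     point_colors = []
--     for i in range(len(covered_status)):
--         is_target = covered_status[i][0]
--         is_covered = covered_status[i][1]
--         is_initially_covered = initial_covered_status[i][1]
--         if is_target == 1:
--             # infill = 'rgba(168, 102, 39, 1)' if is_covered else 'forestgreen'
--             infill = 'rgba(184, 33, 166, 1)' if is_covered else 'forestgreen'
--         elif is_target == -1: # head points
--             # infill = 'red' if is_covered and not is_initially_covered else 'rgba(255,186,71,1)'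
--             infill = 'rgba(255, 186, 71, 1)' if not is_covered or is_initially_covered else 'red'
--         else:
--             infill = 'rgba(255, 186, 71, 1)' if is_covered or not is_initially_covered else 'red'
--         point_colors.append(infill)
--
--     return point_colors
-- ===== SOURCE B (Python) =====
-- def get_body_point_colors_uncovering(initial_covered_status, covered_status):
--     # pass 1: default colors, ignoring the 'red' exception, from covered_status alone
--     defaults = [
--         ('rgba(184, 33, 166, 1)' if c else 'forestgreen') if t == 1
--         else 'rgba(255, 186, 71, 1)'
--         for t, c in covered_status
--     ]
--     # pass 2: the set of indices that must be painted red.  A non-target point is red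
--     # exactly when its coveredness matches 'is head point' and changed since the start.
--     reds = {
--         i for i in range(len(covered_status))
--         if covered_status[i][0] != 1
--         and bool(covered_status[i][1]) == (covered_status[i][0] == -1)
--         and bool(covered_status[i][1]) != bool(initial_covered_status[i][1])
--     }
--     # pass 3: overlay
--     return ['red' if i in reds else color for i, color in enumerate(defaults)]
-- ===== Notes on version B (the rewrite author's own statement) =====
-- stated objective: alternative
-- what changed: Replaces A's single-pass if/elif cascade by three staged passes: a defaults pass over covered_status alone, a pass computing the set of 'red' indices via one unified predicate (non-target, coveredness matches is-head, and coveredness changed since start), and an overlay pass painting those indices red.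
import Mathlib
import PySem

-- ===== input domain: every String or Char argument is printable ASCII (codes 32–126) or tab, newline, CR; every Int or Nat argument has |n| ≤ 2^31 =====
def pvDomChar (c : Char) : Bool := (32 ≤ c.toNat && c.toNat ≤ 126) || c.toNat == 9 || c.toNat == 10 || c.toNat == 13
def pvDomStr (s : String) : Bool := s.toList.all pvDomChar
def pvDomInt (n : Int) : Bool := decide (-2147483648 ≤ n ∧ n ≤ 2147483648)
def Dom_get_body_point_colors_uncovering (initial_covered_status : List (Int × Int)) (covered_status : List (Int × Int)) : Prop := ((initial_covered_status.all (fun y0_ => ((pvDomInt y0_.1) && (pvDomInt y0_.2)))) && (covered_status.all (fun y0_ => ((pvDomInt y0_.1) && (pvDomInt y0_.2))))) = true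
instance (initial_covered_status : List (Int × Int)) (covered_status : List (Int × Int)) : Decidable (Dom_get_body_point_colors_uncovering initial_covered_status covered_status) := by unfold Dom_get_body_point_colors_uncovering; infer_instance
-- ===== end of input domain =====

-- B replaces A's single-pass if/elif cascade by three staged passes (defaults, red-index set,
-- overlay); same O(n) cost; A mutates nothing, the equivalence is about the return value.
-- ===== PORT A =====
def get_body_point_colors_uncovering (initial_covered_status : List (Int × Int)) (covered_status : List (Int × Int)) : List String :=
  (PySem.List.pyRange 0 covered_status.length 1).foldl (fun point_colors i =>
    let ct := PySem.List.pyGetD covered_status i (0, 0)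
    let is_target := ct.1
    let is_covered := ct.2
    let is_initially_covered := (PySem.List.pyGetD initial_covered_status i (0, 0)).2
    let infill :=
      if is_target = 1 then
        (if is_covered ≠ 0 then "rgba(184, 33, 166, 1)" else "forestgreen")
      else if is_target = -1 then
        (if is_covered = 0 ∨ is_initially_covered ≠ 0 then "rgba(255, 186, 71, 1)" else "red")
      else
        (if is_covered ≠ 0 ∨ is_initially_covered = 0 then "rgba(255, 186, 71, 1)" else "red")
    point_colors ++ [infill]) []

-- ===== PORT B =====
def get_body_point_colors_uncovering_alt (initial_covered_status : List (Int × Int)) (covered_status : List (Int × Int)) : List String :=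
  -- pass 1: default colors from covered_status alone
  let defaults := covered_status.map (fun p =>
    if p.1 = 1 then (if p.2 ≠ 0 then "rgba(184, 33, 166, 1)" else "forestgreen")
    else "rgba(255, 186, 71, 1)")
  -- pass 2: the set of indices to paint red
  let reds : PySem.Set Int := PySem.Set.ofList
    ((PySem.List.pyRange 0 covered_status.length 1).filter (fun i =>
      (PySem.List.pyGetD covered_status i (0, 0)).1 ≠ 1 &&
      (decide ((PySem.List.pyGetD covered_status i (0, 0)).2 ≠ 0)
         == decide ((PySem.List.pyGetD covered_status i (0, 0)).1 = -1)) &&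
      (decide ((PySem.List.pyGetD covered_status i (0, 0)).2 ≠ 0)
         != decide ((PySem.List.pyGetD initial_covered_status i (0, 0)).2 ≠ 0))))
  -- pass 3: overlay
  (PySem.List.enumerate defaults).map (fun p =>
    if PySem.Set.contains reds p.1 then "red" else p.2)

-- ===== PRECONDITION & SPEC =====
-- Pre_ excludes exactly the inputs on which A raises IndexError (covered_status longer than initial_covered_status).
def Pre_get_body_point_colors_uncovering (initial_covered_status : List (Int × Int)) (covered_status : List (Int × Int)) : Prop :=
  covered_status.length ≤ initial_covered_status.length
instance (initial_covered_status : List (Int × Int)) (covered_status : List (Int × Int)) : Decidable (Pre_get_body_point_colors_uncovering initial_covered_status covered_status) := by unfold Pre_get_body_point_colors_uncovering; infer_instance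
def pvWitness_get_body_point_colors_uncovering : (List (Int × Int)) × (List (Int × Int)) := ([(1, 1), (0, 0)], [(1, 0), (-1, 1)])
def Spec_get_body_point_colors_uncovering (initial_covered_status : List (Int × Int)) (covered_status : List (Int × Int)) (out : List String) : Prop := out = get_body_point_colors_uncovering_alt initial_covered_status covered_status
instance (initial_covered_status : List (Int × Int)) (covered_status : List (Int × Int)) (out : List String) : Decidable (Spec_get_body_point_colors_uncovering initial_covered_status covered_status out) := by unfold Spec_get_body_point_colors_uncovering; infer_instance

-- ===== CLAIM (what is proved, stated in full; the proofs are below) =====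
def Claim_equal_get_body_point_colors_uncovering : Prop := ∀ (initial_covered_status : List (Int × Int)) (covered_status : List (Int × Int)), Dom_get_body_point_colors_uncovering initial_covered_status covered_status → Pre_get_body_point_colors_uncovering initial_covered_status covered_status → Spec_get_body_point_colors_uncovering initial_covered_status covered_status (get_body_point_colors_uncovering initial_covered_status covered_status)

-- ===== LEMMAS AND PROOFS =====
-- B's overlay of the red predicate over the defaults agrees with A's branch cascade, pointwise
lemma overlay_eq_branches (t c ini2 : Int) :
    (if (t ≠ 1 && (decide (c ≠ 0) == decide (t = -1)) && (decide (c ≠ 0) != decide (ini2 ≠ 0))) = true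
       then "red"
       else (if t = 1 then (if c ≠ 0 then "rgba(184, 33, 166, 1)" else "forestgreen")
             else "rgba(255, 186, 71, 1)"))
    = (if t = 1 then (if c ≠ 0 then "rgba(184, 33, 166, 1)" else "forestgreen")
       else if t = -1 then (if c = 0 ∨ ini2 ≠ 0 then "rgba(255, 186, 71, 1)" else "red")
       else (if c ≠ 0 ∨ ini2 = 0 then "rgba(255, 186, 71, 1)" else "red")) := by
  by_cases h1 : t = 1 <;> by_cases h2 : t = -1 <;> by_cases h3 : c = 0 <;> by_cases h4 : ini2 = 0 <;>
    simp [h1, h2, h3, h4]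

lemma ports_agree (ics cs : List (Int × Int)) (h : cs.length ≤ ics.length) :
    get_body_point_colors_uncovering_alt ics cs = get_body_point_colors_uncovering ics cs := by
  unfold get_body_point_colors_uncovering get_body_point_colors_uncovering_alt
  rw [PySem.List.foldl_append_singleton_eq_map]
  simp only [List.nil_append]
  apply List.ext_getElem
  · simp [PySem.List.length_enumerate, PySem.List.length_pyRange_one]
  · intro k hk1 hk2
    have hkc : k < cs.length := by
      simpa [PySem.List.length_enumerate] using hk1
    have hki : k < ics.length := lt_of_lt_of_le hkc h
    simp only [List.getElem_map, PySem.List.getElem_enumerate, List.getElem_map,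
      PySem.List.getElem_pyRange_one, zero_add]
    -- resolve the set membership test
    have hmem : ∀ (p : Int → Bool),
        PySem.Set.contains (PySem.Set.ofList ((PySem.List.pyRange 0 (cs.length : Int) 1).filter p)) (k : Int)
        = p k := by
      intro p
      by_cases hp : p k = true
      · rw [(PySem.Set.contains_iff _ _).2, hp]
        rw [PySem.Set.mem_ofList, List.mem_filter]
        exact ⟨(PySem.List.mem_pyRange_one).2 ⟨by positivity, by exact_mod_cast hkc⟩, hp⟩
      · have : ¬ ((k : Int) ∈ PySem.Set.ofList ((PySem.List.pyRange 0 (cs.length : Int) 1).filter p)) := by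
          rw [PySem.Set.mem_ofList, List.mem_filter]; tauto
        simp only [Bool.not_eq_true] at hp
        rw [hp]
        cases hcon : PySem.Set.contains (PySem.Set.ofList ((PySem.List.pyRange 0 (cs.length : Int) 1).filter p)) (k : Int)
        · rfl
        · exact absurd ((PySem.Set.contains_iff _ _).1 hcon) this
    rw [hmem]
    simp only [PySem.List.pyGetD_natCast, List.getD_eq_getElem _ _ hkc, List.getD_eq_getElem _ _ hki]
    exact overlay_eq_branches _ _ _

-- ===== VERDICT (by name: the statement is the Claim_ definition above) =====
theorem get_body_point_colors_uncovering_spec : Claim_equal_get_body_point_colors_uncovering := by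
  intro ics cs _ hpre
  unfold Spec_get_body_point_colors_uncovering
  exact (ports_agree ics cs hpre).symm
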